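-- pv_equiv track=rewrite | github.com/piedro404/resolucoes-de-problemas | Uri/Iniciante/Picos e Vales.py | isVale
-- ===== SOURCE A (Python) =====
-- def isVale(dados):
--     if dados[0] == dados[1]:
--         return 0
--
--     seq=-1
--     for x in range(1, len(dados)):
--         p = dados[x-1]
--         seqP = (0 if p > dados[x] else 1)
--         if seq == seqP or p == dados[x]:
--             return 0
--
--         seq = seqP
--
--     return 1
-- ===== SOURCE B (Python) =====
-- def isVale(dados):
--     signs = [(dados[i] > dados[i - 1]) - (dados[i] < dados[i - 1])
--              for i in range(1, len(dados))]
--     if 0 in signs: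
--         return 0
--     for a, b in zip(signs, signs[1:]):
--         if a * b != -1:
--             return 0
--     return 1
-- ===== Notes on version B (the rewrite author's own statement) =====
-- stated objective: alternative
-- what changed: Replaces A's single pass with running branch-state by a precompute-then-verify decomposition: build the list of integer step signs once, reject if any sign is zero, then check every adjacent sign pair multiplies to -1.
import Mathlib
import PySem

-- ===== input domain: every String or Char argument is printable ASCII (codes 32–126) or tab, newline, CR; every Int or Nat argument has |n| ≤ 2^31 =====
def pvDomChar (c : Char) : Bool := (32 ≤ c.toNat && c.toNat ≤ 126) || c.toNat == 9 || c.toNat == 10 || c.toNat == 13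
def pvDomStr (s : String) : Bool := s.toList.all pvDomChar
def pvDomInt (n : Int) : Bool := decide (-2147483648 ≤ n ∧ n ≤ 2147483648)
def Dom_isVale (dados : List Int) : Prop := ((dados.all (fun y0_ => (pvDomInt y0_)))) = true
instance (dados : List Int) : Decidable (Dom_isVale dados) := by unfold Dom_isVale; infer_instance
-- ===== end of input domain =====

-- B replaces A's running branch-state pass by a precompute-then-verify decomposition
-- (sign list first, then a zero check and an adjacent-pair check); same cost, alternative structure.

-- ===== PORT A =====
-- the for-loop over range(1, len(dados)) with early return; indices are always in range, so pyGetD is exact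
def isValeLoop (dados : List Int) (seq : Int) : List Int → Int
  | [] => 1
  | x :: xs =>
    let p := PySem.List.pyGetD dados (x - 1) 0
    let dx := PySem.List.pyGetD dados x 0
    let seqP : Int := if p > dx then 0 else 1
    if seq = seqP ∨ p = dx then 0 else isValeLoop dados seqP xs

def isVale (dados : List Int) : Int :=
  match PySem.List.pyGet? dados 0, PySem.List.pyGet? dados 1 with
  | some d0, some d1 =>
    if d0 = d1 then 0
    else isValeLoop dados (-1) (PySem.List.pyRange 1 dados.length 1)
  | _, _ => 0   -- IndexError in Python (len < 2); excluded by Pre_isVale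

-- ===== PORT B =====
-- the 'for a, b in zip(signs, signs[1:])' loop with early return
def altGo : List (Int × Int) → Int
  | [] => 1
  | (a, b) :: rest => if a * b ≠ -1 then 0 else altGo rest

def isVale_alt (dados : List Int) : Int :=
  let signs := (PySem.List.pyRange 1 dados.length 1).map (fun i =>
    (if PySem.List.pyGetD dados i 0 > PySem.List.pyGetD dados (i - 1) 0 then (1 : Int) else 0)
      - (if PySem.List.pyGetD dados i 0 < PySem.List.pyGetD dados (i - 1) 0 then 1 else 0))
  if (0 : Int) ∈ signs then 0
  else altGo (signs.zip signs.tail)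

-- ===== PRECONDITION & SPEC =====
-- Pre_ excludes exactly the lists of length < 2, on which Python A raises IndexError
-- (B returns 1 there: an empty sign list is vacuously alternating).
def Pre_isVale (dados : List Int) : Prop := 2 ≤ dados.length
instance (dados : List Int) : Decidable (Pre_isVale dados) := by unfold Pre_isVale; infer_instance
def pvWitness_isVale : List Int := [1, 2, 1]

def Spec_isVale (dados : List Int) (out : Int) : Prop := out = isVale_alt dados
instance (dados : List Int) (out : Int) : Decidable (Spec_isVale dados out) := by unfold Spec_isVale; infer_instance

-- ===== CLAIM (what is proved, stated in full; the proofs are below) =====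
def Claim_equal_isVale : Prop := ∀ (dados : List Int), Dom_isVale dados → Pre_isVale dados → Spec_isVale dados (isVale dados)

-- ===== LEMMAS AND PROOFS =====

-- the sign of one step (B's comprehension body, structurally)
def sgn (p d : Int) : Int := (if d > p then 1 else 0) - (if d < p then 1 else 0)

-- structural sign list of the steps of (p :: rest)
def sOf (p : Int) : List Int → List Int
  | [] => []
  | d :: r => sgn p d :: sOf d r

-- structural version of A's loop (state seq, previous element p)
def aGo (seq p : Int) : List Int → Int
  | [] => 1
  | d :: r =>
    let seqP : Int := if p > d then 0 else 1
    if seq = seqP ∨ p = d then 0 else aGo seqP d r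

-- "the sign list is alternating, continuing from previous sign s'"
def goodFrom (s' : Int) : List Int → Bool
  | [] => true
  | s :: r => (s != 0) && (s' * s == -1) && goodFrom s r

-- "the sign list is alternating with nonzero signs"
def good : List Int → Bool
  | [] => true
  | s :: r => (s != 0) && goodFrom s r

theorem isValeLoop_eq_aGo : ∀ (rest : List Int) (pre : List Int) (p seq a b : Int),
    a = (pre.length : Int) + 1 → b = a + rest.length →
    isValeLoop (pre ++ p :: rest) seq (PySem.List.pyRange a b 1) = aGo seq p rest
  | [], pre, p, seq, a, b, ha, hb => by
    rw [PySem.List.pyRange_one_eq_nil (by simp at hb; omega)]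
    simp [isValeLoop, aGo]
  | d :: r, pre, p, seq, a, b, ha, hb => by
    rw [PySem.List.pyRange_one_cons (by simp at hb; omega)]
    have h1 : PySem.List.pyGetD (pre ++ p :: d :: r) (a - 1) 0 = p := by
      rw [show a - 1 = ((pre.length : Nat) : Int) by omega, PySem.List.pyGetD_natCast,
        List.getD_eq_getElem?_getD, List.getElem?_append_right (le_refl _)]
      simp
    have h2 : PySem.List.pyGetD (pre ++ p :: d :: r) a 0 = d := by
      rw [show a = ((pre.length + 1 : Nat) : Int) by push_cast; omega, PySem.List.pyGetD_natCast,
        List.getD_eq_getElem?_getD, List.getElem?_append_right (by omega)]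
      simp
    simp only [isValeLoop, h1, h2, aGo]
    by_cases hc : seq = (if p > d then 0 else 1) ∨ p = d
    · simp [hc]
    · simp only [if_neg hc]
      rw [show pre ++ p :: d :: r = (pre ++ [p]) ++ d :: r by simp]
      exact isValeLoop_eq_aGo r (pre ++ [p]) d _ (a + 1) b
        (by simp at ha ⊢; push_cast; omega) (by simp at hb ⊢; push_cast; omega)

theorem signs_eq_sOf : ∀ (rest : List Int) (pre xs : List Int) (p a b : Int),
    xs = pre ++ p :: rest → a = (pre.length : Int) + 1 → b = a + rest.length →
    (PySem.List.pyRange a b 1).map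
      (fun i =>
        (if PySem.List.pyGetD xs i 0 > PySem.List.pyGetD xs (i - 1) 0 then (1 : Int) else 0)
          - (if PySem.List.pyGetD xs i 0 < PySem.List.pyGetD xs (i - 1) 0 then 1 else 0))
      = sOf p rest
  | [], pre, xs, p, a, b, hx, ha, hb => by
    rw [PySem.List.pyRange_one_eq_nil (by simp at hb; omega)]
    simp [sOf]
  | d :: r, pre, xs, p, a, b, hx, ha, hb => by
    rw [PySem.List.pyRange_one_cons (by simp at hb; omega)]
    have h1 : PySem.List.pyGetD xs (a - 1) 0 = p := by
      subst hx
      rw [show a - 1 = ((pre.length : Nat) : Int) by omega, PySem.List.pyGetD_natCast,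
        List.getD_eq_getElem?_getD, List.getElem?_append_right (le_refl _)]
      simp
    have h2 : PySem.List.pyGetD xs a 0 = d := by
      subst hx
      rw [show a = ((pre.length + 1 : Nat) : Int) by push_cast; omega, PySem.List.pyGetD_natCast,
        List.getD_eq_getElem?_getD, List.getElem?_append_right (by omega)]
      simp
    rw [List.map_cons]
    show _ :: _ = sgn p d :: sOf d r
    congr 1
    · rw [h1, h2]; simp [sgn]
    · exact signs_eq_sOf r (pre ++ [p]) xs d (a + 1) b
        (by simp [hx]) (by simp at ha ⊢; omega) (by simp at hb ⊢; omega)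

theorem aGo_goodFrom : ∀ (l : List Int) (p s' : Int), s' = -1 ∨ s' = 1 →
    aGo (if s' = -1 then 0 else 1) p l = if goodFrom s' (sOf p l) then 1 else 0
  | [], p, s', _ => by simp [aGo, sOf, goodFrom]
  | d :: r, p, s', hs => by
    have ih1 := aGo_goodFrom r d 1 (Or.inr rfl)
    have ihm := aGo_goodFrom r d (-1) (Or.inl rfl)
    norm_num at ih1 ihm
    rcases lt_trichotomy p d with h | h | h
    · have hsg : sgn p d = 1 := by simp [sgn, h, not_lt.mpr h.le]
      rcases hs with hs | hs <;> subst hs <;>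
        simp [aGo, sOf, goodFrom, hsg, not_lt.mpr h.le, h.ne, ih1]
    · subst h; simp [aGo, sOf, goodFrom, sgn]
    · have hsg : sgn p d = -1 := by simp [sgn, h, not_lt.mpr h.le]
      rcases hs with hs | hs <;> subst hs <;>
        simp [aGo, sOf, goodFrom, hsg, h, h.ne', ihm]

theorem aGo_start (l : List Int) (p : Int) :
    aGo (-1) p l = if good (sOf p l) then 1 else 0 := by
  cases l with
  | nil => simp [aGo, sOf, good]
  | cons d r =>
    have ih1 := aGo_goodFrom r d 1 (Or.inr rfl)
    have ihm := aGo_goodFrom r d (-1) (Or.inl rfl)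
    norm_num at ih1 ihm
    rcases lt_trichotomy p d with h | h | h
    · have hsg : sgn p d = 1 := by simp [sgn, h, not_lt.mpr h.le]
      simp [aGo, sOf, good, goodFrom, hsg, not_lt.mpr h.le, h.ne, ih1]
    · subst h; simp [aGo, sOf, good, goodFrom, sgn]
    · have hsg : sgn p d = -1 := by simp [sgn, h, not_lt.mpr h.le]
      simp [aGo, sOf, good, goodFrom, hsg, h, h.ne', ihm]

theorem goodFrom_of_mem_zero : ∀ (l : List Int) (s' : Int), (0 : Int) ∈ l → goodFrom s' l = false
  | [], _, h => by cases h
  | s :: r, s', h => by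
    rcases List.mem_cons.mp h with h | h
    · simp [goodFrom, ← h]
    · simp [goodFrom, goodFrom_of_mem_zero r s h]

theorem altGo_no_zero : ∀ (l : List Int), (0 : Int) ∉ l →
    altGo (l.zip l.tail) = if good l then 1 else 0
  | [], _ => by simp [altGo, good]
  | [s], h => by
    simp only [List.mem_singleton] at h
    simp [altGo, good, goodFrom, Ne.symm h]
  | a :: b :: r, h => by
    have ha : a ≠ 0 := fun e => h (by simp [e])
    have hb : b ≠ 0 := fun e => h (by simp [e])
    have hr : (0 : Int) ∉ b :: r := fun e => h (List.mem_cons_of_mem _ e)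
    have ih := altGo_no_zero (b :: r) hr
    simp only [List.tail_cons, List.zip_cons_cons, altGo, good, goodFrom] at ih ⊢
    by_cases hab : a * b = -1
    · rw [if_neg (by simp [hab]), ih]
      simp [ha, hb, hab]
    · rw [if_pos hab]
      simp [ha, hb, hab]

theorem bCore_eq (l : List Int) :
    (if (0 : Int) ∈ l then 0 else altGo (l.zip l.tail)) = if good l then 1 else 0 := by
  by_cases h : (0 : Int) ∈ l
  · cases l with
    | nil => cases h
    | cons s r =>
      rcases List.mem_cons.mp h with h' | h'
      · simp [h, good, ← h']
      · simp [h, good, goodFrom_of_mem_zero r s h']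
  · simp [h, altGo_no_zero l h]

theorem isVale_alt_eq (p d : Int) (rest : List Int) :
    isVale_alt (p :: d :: rest) = if good (sOf p (d :: rest)) then 1 else 0 := by
  have hs := signs_eq_sOf (d :: rest) [] (p :: d :: rest) p 1 ((p :: d :: rest).length : Int)
    (by simp) (by simp) (by simp; ring)
  simp only [isVale_alt]
  simp only [hs]
  exact bCore_eq _

theorem isVale_eq (p d : Int) (rest : List Int) :
    isVale (p :: d :: rest) = if good (sOf p (d :: rest)) then 1 else 0 := by
  have e2 : PySem.List.pyGet? (p :: d :: rest) 1 = some d := by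
    have : PySem.List.pyGet? (p :: d :: rest) (((0 : Nat) : Int) + 1) = some d := by
      rw [PySem.List.pyGet?_cons_succ]; simp
    simpa using this
  have hl := isValeLoop_eq_aGo (d :: rest) [] p (-1) 1 ((p :: d :: rest).length : Int)
    (by simp) (by push_cast; simp; ring)
  simp only [List.nil_append] at hl
  simp only [isVale, PySem.List.pyGet?_zero_cons, e2]
  by_cases hpd : p = d
  · subst hpd
    simp [sOf, sgn, good]
  · simp only [if_neg hpd]
    rw [hl, aGo_start]

-- ===== VERDICT (by name: the statement is the Claim_ definition above) =====
theorem isVale_spec : Claim_equal_isVale := by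
  intro dados _ hpre
  unfold Spec_isVale
  match dados, hpre with
  | p :: d :: rest, _ => rw [isVale_eq, isVale_alt_eq]
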